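-- pv_equiv track=rewrite | github.com/quarterback/viperball | scripts/extract_osaa_tennis.py | find_tennis_section
-- ===== SOURCE A (Python) =====
-- def find_tennis_section(text):
--     """Extract the tennis portion of the text."""
--     text_upper = text.upper()
--     # Find TENNIS header
--     idx = text_upper.find("TENNIS")
--     if idx == -1:
--         return text  # Return all text if no clear tennis section
--     # Find the next sport section after tennis (common headers)
--     next_sports = ["TRACK", "BASEBALL", "SOFTBALL", "GOLF", "SWIMMING", "WRESTLING",
--                    "BASKETBALL", "FOOTBALL", "VOLLEYBALL", "SOCCER", "CROSS COUNTRY"]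
--     end_idx = len(text)
--     for sport in next_sports:
--         pos = text_upper.find(sport, idx + 10)
--         if pos != -1 and pos < end_idx:
--             end_idx = pos
--     return text[idx:end_idx]
-- ===== SOURCE B (Python) =====
-- NEXT_SPORT_HEADERS = ("TRACK", "BASEBALL", "SOFTBALL", "GOLF", "SWIMMING", "WRESTLING",
--                       "BASKETBALL", "FOOTBALL", "VOLLEYBALL", "SOCCER", "CROSS COUNTRY")
--
--
-- def find_tennis_section(text):
--     """Extract the tennis portion of the text."""
--     text_upper = text.upper()
--     idx = text_upper.find("TENNIS")
--     if idx == -1: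
--         return text  # Return all text if no clear tennis section
--     # Single left-to-right scan: stop at the first position (at or after idx+10)
--     # where any of the sport headers begins.
--     for j in range(idx + 10, len(text)):
--         if any(text_upper.startswith(h, j) for h in NEXT_SPORT_HEADERS):
--             return text[idx:j]
--     return text[idx:]
-- ===== Notes on version B (the rewrite author's own statement) =====
-- stated objective: alternative
-- what changed: Replaces A's eleven separate find()-and-take-minimum passes over the text with one single left-to-right scan that stops at the first position (>= idx+10) where any sport header begins (leftmost-match semantics).
import Mathlib
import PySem

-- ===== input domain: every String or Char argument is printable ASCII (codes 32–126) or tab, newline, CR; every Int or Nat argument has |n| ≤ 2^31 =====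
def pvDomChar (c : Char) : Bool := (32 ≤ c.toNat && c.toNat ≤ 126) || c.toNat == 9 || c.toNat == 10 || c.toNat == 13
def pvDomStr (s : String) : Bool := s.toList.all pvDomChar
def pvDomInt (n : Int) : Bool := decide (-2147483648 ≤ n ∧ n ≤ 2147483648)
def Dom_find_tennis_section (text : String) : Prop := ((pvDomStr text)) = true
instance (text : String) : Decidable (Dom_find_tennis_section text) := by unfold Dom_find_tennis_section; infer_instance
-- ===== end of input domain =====

-- B replaces A's eleven find()+minimum passes by one left-to-right scan for the first
-- header occurrence; same return value, no speed claim (objective: alternative).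

-- ===== PORT A =====
-- the for-loop over next_sports, as a fold over the same (end_idx) state
def pvFoldA (tu : List Char) (st : Int) (ss : List (List Char)) (e0 : Int) : Int :=
  ss.foldl (fun e sport =>
    let pos := PySem.Chars.findFrom tu sport st none
    if pos ≠ -1 ∧ pos < e then pos else e) e0

def find_tennis_section (text : String) : String :=
  let t := text.toList
  let text_upper := PySem.Chars.upper t
  let idx := PySem.Chars.find text_upper "TENNIS".toList
  if idx = -1 then text
  else
    let next_sports : List (List Char) :=
      ["TRACK".toList, "BASEBALL".toList, "SOFTBALL".toList, "GOLF".toList,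
       "SWIMMING".toList, "WRESTLING".toList, "BASKETBALL".toList, "FOOTBALL".toList,
       "VOLLEYBALL".toList, "SOCCER".toList, "CROSS COUNTRY".toList]
    let end_idx := pvFoldA text_upper (idx + 10) next_sports (t.length : Int)
    String.ofList (PySem.List.slice t (some idx) (some end_idx))

-- ===== PORT B =====
def pvHeaders : List (List Char) :=
  ["TRACK".toList, "BASEBALL".toList, "SOFTBALL".toList, "GOLF".toList,
   "SWIMMING".toList, "WRESTLING".toList, "BASKETBALL".toList, "FOOTBALL".toList,
   "VOLLEYBALL".toList, "SOCCER".toList, "CROSS COUNTRY".toList]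

-- any(text_upper.startswith(h, j) …): Python startswith(h, j) with 0 ≤ j is exactly
-- "h is a prefix of text_upper[j:]", i.e. startswith on (tu.drop j)
def pvP (tu : List Char) (j : Nat) : Bool :=
  pvHeaders.any (fun h => PySem.Chars.startswith (tu.drop j) h)

-- the 'for j in range(start, len(text))' scan, counting down the remaining length
def pvScanB (tu : List Char) : Nat → Nat → Option Nat
  | _, 0 => none
  | j, m + 1 => if pvP tu j then some j else pvScanB tu (j + 1) m

def find_tennis_section_alt (text : String) : String :=
  let t := text.toList
  let text_upper := PySem.Chars.upper t
  let idx := PySem.Chars.find text_upper "TENNIS".toList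
  if idx = -1 then text
  else
    let start := (idx + 10).toNat
    match pvScanB text_upper start (t.length - start) with
    | some j => String.ofList (PySem.List.slice t (some idx) (some (j : Int)))
    | none => String.ofList (PySem.List.slice t (some idx) none)

-- ===== PRECONDITION & SPEC =====
def Spec_find_tennis_section (text : String) (out : String) : Prop := out = find_tennis_section_alt text
instance (text : String) (out : String) : Decidable (Spec_find_tennis_section text out) := by unfold Spec_find_tennis_section; infer_instance

-- ===== CLAIM (what is proved, stated in full; the proofs are below) =====
def Claim_equal_find_tennis_section : Prop := ∀ (text : String), Dom_find_tennis_section text → Spec_find_tennis_section text (find_tennis_section text)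

-- ===== LEMMAS AND PROOFS =====

lemma pvHeaders_ne_nil : ∀ h ∈ pvHeaders, h ≠ [] := by decide

lemma pvP_iff (tu : List Char) (j : Nat) :
    pvP tu j = true ↔ ∃ h ∈ pvHeaders, h <+: tu.drop j := by
  simp [pvP, List.any_eq_true, PySem.Chars.startswith_iff]

lemma pvP_lt_len (tu : List Char) (j : Nat) (hp : pvP tu j = true) : j < tu.length := by
  obtain ⟨h, hmem, hpre⟩ := (pvP_iff tu j).mp hp
  have h1 : h.length ≤ (tu.drop j).length := hpre.length_le
  have h2 : 0 < h.length := List.length_pos_iff.mpr (pvHeaders_ne_nil h hmem)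
  simp [List.length_drop] at h1
  omega

lemma pvInfix_drop_iff (u sub : List Char) (k : Nat) :
    sub <:+: u.drop k ↔ ∃ j, k ≤ j ∧ sub <+: u.drop j := by
  constructor
  · intro h
    obtain ⟨s, hs, hsuf⟩ := List.infix_iff_prefix_suffix.mp h
    obtain ⟨pre, hpre⟩ := hsuf
    have hs2 : s = List.drop (k + pre.length) u := by
      rw [← List.drop_drop, ← hpre, List.drop_left]
    exact ⟨k + pre.length, by omega, hs2 ▸ hs⟩
  · rintro ⟨j, hkj, hpre⟩
    have h2 : u.drop j = (u.drop k).drop (j - k) := by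
      rw [List.drop_drop, Nat.add_sub_cancel' hkj]
    rw [h2] at hpre
    exact hpre.isInfix.trans (List.drop_suffix _ _).isInfix

lemma pvScanB_some (tu : List Char) :
    ∀ (m j r : Nat), pvScanB tu j m = some r →
      j ≤ r ∧ r < j + m ∧ pvP tu r = true ∧ ∀ i, j ≤ i → i < r → pvP tu i = false := by
  intro m
  induction m with
  | zero => intro j r h; simp [pvScanB] at h
  | succ m ih =>
    intro j r h
    by_cases hp : pvP tu j = true
    · simp [pvScanB, hp] at h
      subst h
      exact ⟨le_refl _, by omega, hp, fun i h1 h2 => absurd h2 (by omega)⟩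
    · simp [pvScanB, hp] at h
      obtain ⟨h1, h2, h3, h4⟩ := ih (j + 1) r h
      refine ⟨by omega, by omega, h3, fun i hi1 hi2 => ?_⟩
      rcases Nat.eq_or_lt_of_le hi1 with he | hl
      · subst he; simpa using hp
      · exact h4 i hl hi2

lemma pvScanB_none (tu : List Char) :
    ∀ (m j : Nat), pvScanB tu j m = none →
      ∀ i, j ≤ i → i < j + m → pvP tu i = false := by
  intro m
  induction m with
  | zero => intro j _ i h1 h2; omega
  | succ m ih =>
    intro j h i h1 h2
    by_cases hp : pvP tu j = true
    · simp [pvScanB, hp] at h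
    · simp [pvScanB, hp] at h
      rcases Nat.eq_or_lt_of_le h1 with he | hl
      · subst he; simpa using hp
      · exact ih (j + 1) h i hl (by omega)

lemma pvFoldA_spec (tu : List Char) (st : Int) :
    ∀ (ss : List (List Char)) (e0 : Int),
      (pvFoldA tu st ss e0 = e0 ∨
        ∃ s ∈ ss, pvFoldA tu st ss e0 = PySem.Chars.findFrom tu s st none ∧
          PySem.Chars.findFrom tu s st none ≠ -1) ∧
      pvFoldA tu st ss e0 ≤ e0 ∧
      ∀ s ∈ ss, PySem.Chars.findFrom tu s st none ≠ -1 →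
        pvFoldA tu st ss e0 ≤ PySem.Chars.findFrom tu s st none := by
  intro ss
  induction ss with
  | nil => intro e0; refine ⟨Or.inl rfl, le_refl _, by simp⟩
  | cons s ss ih =>
    intro e0
    by_cases hc : PySem.Chars.findFrom tu s st none ≠ -1 ∧ PySem.Chars.findFrom tu s st none < e0
    · have hstep : pvFoldA tu st (s :: ss) e0 = pvFoldA tu st ss (PySem.Chars.findFrom tu s st none) := by
        simp [pvFoldA, hc]
      obtain ⟨h1, h2, h3⟩ := ih (PySem.Chars.findFrom tu s st none)
      refine ⟨?_, ?_, ?_⟩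
      · rcases h1 with h1 | ⟨s', hs', he, hne⟩
        · exact Or.inr ⟨s, List.mem_cons_self, by rw [hstep, h1], hc.1⟩
        · exact Or.inr ⟨s', List.mem_cons_of_mem _ hs', by rw [hstep, he], hne⟩
      · rw [hstep]; exact le_trans h2 (le_of_lt hc.2)
      · intro s' hs' hne
        rcases List.mem_cons.mp hs' with he | hm
        · subst he; rw [hstep]; exact h2
        · rw [hstep]; exact h3 s' hm hne
    · have hstep : pvFoldA tu st (s :: ss) e0 = pvFoldA tu st ss e0 := by
        simp only [pvFoldA, List.foldl_cons]
        rw [if_neg hc]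
      obtain ⟨h1, h2, h3⟩ := ih e0
      refine ⟨?_, hstep ▸ h2, ?_⟩
      · rcases h1 with h1 | ⟨s', hs', he, hne⟩
        · exact Or.inl (hstep ▸ h1)
        · exact Or.inr ⟨s', List.mem_cons_of_mem _ hs', hstep ▸ he, hne⟩
      · intro s' hs' hne
        rcases List.mem_cons.mp hs' with he | hm
        · subst he
          have : ¬ PySem.Chars.findFrom tu s' st none < e0 := by tauto
          rw [hstep]; exact le_trans h2 (not_lt.mp this)
        · rw [hstep]; exact h3 s' hm hne

-- findFrom returns -1 when the (nonnegative) start lies past the end of the string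
lemma pvFindFrom_past_end (s sub : List Char) (st : Int) (h0 : 0 ≤ st)
    (h : (s.length : Int) < st) : PySem.Chars.findFrom s sub st none = -1 := by
  simp only [PySem.Chars.findFrom]
  rw [if_neg (not_lt.mpr h0)]
  rw [if_pos h]

-- the core equality, none case: no header after idx+10, so A's end_idx stays len(text)
lemma pv_core_none (t : List Char) (idx : Int) (h0 : 0 ≤ idx)
    (hscan : pvScanB (PySem.Chars.upper t) (idx + 10).toNat (t.length - (idx + 10).toNat) = none) :
    pvFoldA (PySem.Chars.upper t) (idx + 10) pvHeaders (t.length : Int) = (t.length : Int) := by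
  set tu := PySem.Chars.upper t with htu
  have hlen : tu.length = t.length := by simp [htu, PySem.Chars.upper]
  set start : Nat := (idx + 10).toNat with hstart
  have hcast : (idx + 10 : Int) = (start : Int) := by omega
  rw [hcast]
  obtain ⟨hdisj, hle, hmin⟩ := pvFoldA_spec tu (start : Int) pvHeaders (t.length : Int)
  have hnone := pvScanB_none tu (t.length - start) start hscan
  have hall : ∀ s ∈ pvHeaders, PySem.Chars.findFrom tu s (start : Int) none = -1 := by
    intro s hs
    by_cases hsl : start ≤ tu.length
    · rw [PySem.Chars.findFrom_natCast_eq_neg_one_iff tu s start hsl]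
      intro hinf
      obtain ⟨j, hj1, hj2⟩ := (pvInfix_drop_iff tu s start).mp hinf
      have hpj : pvP tu j = true := (pvP_iff tu j).mpr ⟨s, hs, hj2⟩
      have hjlt : j < tu.length := pvP_lt_len tu j hpj
      have := hnone j hj1 (by omega)
      simp [this] at hpj
    · exact pvFindFrom_past_end tu s (start : Int) (by positivity) (by omega)
  rcases hdisj with h | ⟨s, hs, _, hne⟩
  · exact h
  · exact absurd (hall s hs) hne

-- the core equality, some case: A's end_idx is exactly B's first match position
lemma pv_core_some (t : List Char) (idx : Int) (h0 : 0 ≤ idx) (j : Nat)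
    (hscan : pvScanB (PySem.Chars.upper t) (idx + 10).toNat (t.length - (idx + 10).toNat) = some j) :
    pvFoldA (PySem.Chars.upper t) (idx + 10) pvHeaders (t.length : Int) = (j : Int) := by
  set tu := PySem.Chars.upper t with htu
  have hlen : tu.length = t.length := by simp [htu, PySem.Chars.upper]
  set start : Nat := (idx + 10).toNat with hstart
  have hcast : (idx + 10 : Int) = (start : Int) := by omega
  rw [hcast]
  obtain ⟨hdisj, hle, hmin⟩ := pvFoldA_spec tu (start : Int) pvHeaders (t.length : Int)
  obtain ⟨hj1, hj2, hpj, hminscan⟩ := pvScanB_some tu (t.length - start) start j hscan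
  have hjlt : j < tu.length := pvP_lt_len tu j hpj
  have hsl : start ≤ tu.length := by omega
  obtain ⟨h, hhm, hhpre⟩ := (pvP_iff tu j).mp hpj
  -- the sport matching at j has findFrom ≤ j and ≠ -1
  have hinf : h <:+: tu.drop start := (pvInfix_drop_iff tu h start).mpr ⟨j, hj1, hhpre⟩
  have hne : PySem.Chars.findFrom tu h (start : Int) none ≠ -1 := by
    rw [Ne, PySem.Chars.findFrom_natCast_eq_neg_one_iff tu h start hsl]
    exact not_not.mpr hinf
  obtain ⟨hge, _, hminh⟩ := PySem.Chars.findFrom_natCast_spec tu h start hsl hne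
  have hle_j : PySem.Chars.findFrom tu h (start : Int) none ≤ (j : Int) := by
    by_contra hlt
    exact hminh j hj1 (by omega) hhpre
  have hrle : pvFoldA tu (start : Int) pvHeaders (t.length : Int) ≤ (j : Int) :=
    le_trans (hmin h hhm hne) hle_j
  rcases hdisj with hr | ⟨s, hs, he, hne'⟩
  · exfalso; rw [hr] at hrle; omega
  · -- the fold result is some sport's first occurrence; it matches there, so j ≤ it
    obtain ⟨hge', hpre', _⟩ := PySem.Chars.findFrom_natCast_spec tu s start hsl hne'
    set p : Int := PySem.Chars.findFrom tu s (start : Int) none with hp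
    have hp0 : 0 ≤ p := le_trans (by positivity) hge'
    have hpP : pvP tu p.toNat = true := (pvP_iff tu p.toNat).mpr ⟨s, hs, hpre'⟩
    have hjp : j ≤ p.toNat := by
      by_contra hlt
      have hfalse := hminscan p.toNat (by omega) (by omega)
      simp [hfalse] at hpP
    omega

lemma pv_slice_full (t : List Char) (idx : Int) (h0 : 0 ≤ idx) :
    PySem.List.slice t (some idx) (some (t.length : Int)) = PySem.List.slice t (some idx) none := by
  rw [PySem.List.slice_toNat t h0 (by positivity), PySem.List.slice_from t h0]
  apply List.take_of_length_le
  simp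

-- ===== VERDICT (by name: the statement is the Claim_ definition above) =====
theorem find_tennis_section_spec : Claim_equal_find_tennis_section := by
  intro text _
  unfold Spec_find_tennis_section find_tennis_section find_tennis_section_alt
  by_cases hidx : PySem.Chars.find (PySem.Chars.upper text.toList) "TENNIS".toList = -1
  · rw [if_pos hidx, if_pos hidx]
  · simp only [if_neg hidx]
    have h0 : 0 ≤ PySem.Chars.find (PySem.Chars.upper text.toList) "TENNIS".toList := by
      have htriv : (0 : Nat) ≤ (PySem.Chars.upper text.toList).length := Nat.zero_le _
      have := PySem.Chars.findFrom_natCast_spec (PySem.Chars.upper text.toList) "TENNIS".toList 0 htriv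
        (by simpa [PySem.Chars.findFrom_zero] using hidx)
      simpa [PySem.Chars.findFrom_zero] using this.1
    rw [show (["TRACK".toList, "BASEBALL".toList, "SOFTBALL".toList, "GOLF".toList,
       "SWIMMING".toList, "WRESTLING".toList, "BASKETBALL".toList, "FOOTBALL".toList,
       "VOLLEYBALL".toList, "SOCCER".toList, "CROSS COUNTRY".toList] : List (List Char)) = pvHeaders from rfl]
    cases hscan : pvScanB (PySem.Chars.upper text.toList)
        (PySem.Chars.find (PySem.Chars.upper text.toList) "TENNIS".toList + 10).toNat
        (text.toList.length - (PySem.Chars.find (PySem.Chars.upper text.toList) "TENNIS".toList + 10).toNat) with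
    | some j => rw [pv_core_some text.toList _ h0 j hscan]
    | none => rw [pv_core_none text.toList _ h0 hscan, pv_slice_full text.toList _ h0]
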